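-- pv_equiv track=rewrite | github.com/foreverchaos/algo_python | python_proj/session 6/first_nums_smaller.py | get_first_nums_smaller_than_target
-- ===== SOURCE A (Python) =====
-- def get_first_nums_smaller_than_target(nums, target):
--     if len(nums) == 0:
--         return -1
--     dp = [False] * len(nums)
--     dp[0] = True if nums[0] > target else False
--     for i in range(1, len(nums)):
--         dp[i] = True if not dp[i-1] and nums[i] > target else False
--
--     for j in range(len(dp)):
--         if dp[j]:
--             return j
-- ===== SOURCE B (Python) =====
-- def get_first_nums_smaller_than_target(nums, target):
--     for i, x in enumerate(nums):
--         if x > target: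
--             return i
--     return -1
-- ===== Notes on version B (the rewrite author's own statement) =====
-- stated objective: simpler
-- what changed: Replaced the two-pass dp construction (build a boolean table, then scan it) by a single enumerate pass returning the first index whose element exceeds target, with -1 when none exists.
-- intended difference: On nonempty lists where no element exceeds target, A falls off the end and returns None, while B returns -1 as the explicit empty-list case of A shows is intended. — e.g. on get_first_nums_smaller_than_target([0], 0): A returns none, B returns some (-1)
import Mathlib
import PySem

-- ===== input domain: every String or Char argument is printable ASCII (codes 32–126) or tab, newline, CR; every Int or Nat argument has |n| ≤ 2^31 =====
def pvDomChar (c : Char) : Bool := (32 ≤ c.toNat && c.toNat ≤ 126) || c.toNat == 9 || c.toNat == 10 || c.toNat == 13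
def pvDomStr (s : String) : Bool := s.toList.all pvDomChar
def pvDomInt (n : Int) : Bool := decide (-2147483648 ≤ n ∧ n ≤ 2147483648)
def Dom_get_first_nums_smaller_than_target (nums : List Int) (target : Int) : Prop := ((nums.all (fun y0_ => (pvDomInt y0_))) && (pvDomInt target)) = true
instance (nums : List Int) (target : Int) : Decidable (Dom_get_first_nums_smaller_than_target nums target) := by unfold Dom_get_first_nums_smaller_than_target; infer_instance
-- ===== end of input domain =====

-- B replaces A's two passes (build a boolean dp table, then scan it) by one enumerate pass; on
-- nonempty lists with no element > target A falls off the end returning None, B returns the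
-- intended -1 (stated in D_ below).

-- ===== PORT A =====
-- 'for j in range(len(dp)): if dp[j]: return j' then implicit 'return None'
def pvFindTrue : List Bool → Int → Option Int
  | [], _ => none
  | b :: rest, j => if b then some j else pvFindTrue rest (j + 1)

def get_first_nums_smaller_than_target (nums : List Int) (target : Int) : Option Int :=
  if nums.length == 0 then some (-1)
  else
    -- dp = [False] * len(nums); dp[0] = nums[0] > target
    let dp : List Bool := (List.replicate nums.length false).set 0 (decide (nums.getD 0 0 > target))
    -- for i in range(1, len(nums)): dp[i] = not dp[i-1] and nums[i] > target
    let dp : List Bool := (PySem.List.pyRange 1 (nums.length : Int) 1).foldl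
      (fun d i => d.set i.toNat (!(d.getD (i.toNat - 1) false) && decide (nums.getD i.toNat 0 > target))) dp
    pvFindTrue dp 0

-- ===== PORT B =====
-- 'for i, x in enumerate(nums): if x > target: return i; return -1'
def pvScan (xs : List Int) (target : Int) (i : Int) : Int :=
  match xs with
  | [] => -1
  | x :: rest => if x > target then i else pvScan rest target (i + 1)

def get_first_nums_smaller_than_target_alt (nums : List Int) (target : Int) : Option Int :=
  some (pvScan nums target 0)

-- ===== PRECONDITION & SPEC =====
-- On nonempty nums with every element ≤ target, A returns None (it falls off the end of the
-- function), while B returns -1, the "not found" value A itself uses for the empty list — B's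
-- value is the intended one.
def D_get_first_nums_smaller_than_target (nums : List Int) (target : Int) : Prop :=
  nums ≠ [] ∧ ∀ x ∈ nums, x ≤ target
instance (nums : List Int) (target : Int) : Decidable (D_get_first_nums_smaller_than_target nums target) := by
  unfold D_get_first_nums_smaller_than_target; infer_instance

def Spec_get_first_nums_smaller_than_target (nums : List Int) (target : Int) (out : Option Int) : Prop :=
  ¬ D_get_first_nums_smaller_than_target nums target → out = get_first_nums_smaller_than_target_alt nums target
instance (nums : List Int) (target : Int) (out : Option Int) : Decidable (Spec_get_first_nums_smaller_than_target nums target out) := by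
  unfold Spec_get_first_nums_smaller_than_target; infer_instance

def pvDiffWitness_get_first_nums_smaller_than_target : List Int × Int := ([0], 0)
def pvDiffWitnessOut_get_first_nums_smaller_than_target : (Option Int) × (Option Int) := (none, some (-1))

-- ===== CLAIM (what is proved, stated in full; the proofs are below) =====
def Claim_unchanged_get_first_nums_smaller_than_target : Prop := ∀ (nums : List Int) (target : Int), Dom_get_first_nums_smaller_than_target nums target → Spec_get_first_nums_smaller_than_target nums target (get_first_nums_smaller_than_target nums target)
def Claim_changed_get_first_nums_smaller_than_target : Prop := Dom_get_first_nums_smaller_than_target (pvDiffWitness_get_first_nums_smaller_than_target.1) (pvDiffWitness_get_first_nums_smaller_than_target.2) ∧ D_get_first_nums_smaller_than_target (pvDiffWitness_get_first_nums_smaller_than_target.1) (pvDiffWitness_get_first_nums_smaller_than_target.2) ∧ get_first_nums_smaller_than_target (pvDiffWitness_get_first_nums_smaller_than_target.1) (pvDiffWitness_get_first_nums_smaller_than_target.2) = pvDiffWitnessOut_get_first_nums_smaller_than_target.1 ∧ get_first_nums_smaller_than_target_alt (pvDiffWitness_get_first_nums_smaller_than_target.1) (pvDiffWitness_get_first_nums_smaller_than_target.2)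 = pvDiffWitnessOut_get_first_nums_smaller_than_target.2 ∧ pvDiffWitnessOut_get_first_nums_smaller_than_target.1 ≠ pvDiffWitnessOut_get_first_nums_smaller_than_target.2
def Claim_exact_get_first_nums_smaller_than_target : Prop := ∀ (nums : List Int) (target : Int), Dom_get_first_nums_smaller_than_target nums target → D_get_first_nums_smaller_than_target nums target → get_first_nums_smaller_than_target nums target ≠ get_first_nums_smaller_than_target_alt nums target

-- ===== LEMMAS AND PROOFS =====

-- the dp recurrence as a structural recursion carrying the previous dp value
def pvDpSpec (xs : List Int) (target : Int) (prev : Bool) : List Bool :=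
  match xs with
  | [] => []
  | x :: rest =>
    let b := !prev && decide (x > target)
    b :: pvDpSpec rest target b

theorem pvDpSpec_length (xs : List Int) (target : Int) (prev : Bool) :
    (pvDpSpec xs target prev).length = xs.length := by
  induction xs generalizing prev with
  | nil => rfl
  | cons x rest ih => simp [pvDpSpec, ih]

theorem pvGetLastD_cons (b : Bool) (m : List Bool) (p : Bool) :
    (b :: m).getLastD p = m.getLastD b := by
  cases m <;> simp [List.getLastD]

theorem pvDpSpec_append_single (l : List Int) (x target : Int) (p : Bool) :
    pvDpSpec (l ++ [x]) target p
      = pvDpSpec l target p ++ [!((pvDpSpec l target p).getLastD p) && decide (x > target)] := by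
  induction l generalizing p with
  | nil => simp [pvDpSpec]
  | cons y l' ih =>
    simp only [List.cons_append, pvDpSpec, ih, List.cons.injEq, true_and]
    rw [pvGetLastD_cons]

theorem pvDpSpec_getD_last (l : List Int) (target : Int) (h : l ≠ []) :
    (pvDpSpec l target false).getD (l.length - 1) false
      = (pvDpSpec l target false).getLastD false := by
  have hlen : (pvDpSpec l target false).length = l.length := pvDpSpec_length l target false
  have hne : pvDpSpec l target false ≠ [] := by
    intro hc
    apply h
    have := pvDpSpec_length l target false
    rw [hc] at this
    exact List.eq_nil_of_length_eq_zero this.symm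
  have hpos : 0 < l.length := List.length_pos_iff.mpr h
  rw [List.getD_eq_getElem?_getD, ← hlen]
  rw [List.getLastD_eq_getLast?, List.getLast?_eq_getElem?]

-- the foldl in port A builds exactly pvDpSpec (padded with the untouched false tail)
theorem pvFold_eq_dpSpec (nums : List Int) (target : Int) (k : ℕ)
    (h1 : 1 ≤ k) (h2 : k ≤ nums.length) :
    (PySem.List.pyRange 1 (k : Int) 1).foldl
      (fun d i => d.set i.toNat (!(d.getD (i.toNat - 1) false) && decide (nums.getD i.toNat 0 > target)))
      ((List.replicate nums.length false).set 0 (decide (nums.getD 0 0 > target)))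
    = pvDpSpec (nums.take k) target false ++ List.replicate (nums.length - k) false := by
  induction k with
  | zero => omega
  | succ k ih =>
    rcases Nat.lt_or_ge k 1 with hk | hk
    · -- base case k+1 = 1
      have hk0 : k = 0 := by omega
      subst hk0
      have : PySem.List.pyRange 1 ((1 : ℕ) : Int) 1 = [] := PySem.List.pyRange_one_eq_nil (by norm_num)
      rw [this]
      rcases nums with _ | ⟨x, rest⟩
      · simp at h2
      · simp [pvDpSpec, List.replicate_succ]
    · have hk2 : k ≤ nums.length := by omega
      have hrange : PySem.List.pyRange 1 ((k + 1 : ℕ) : Int) 1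
          = PySem.List.pyRange 1 (k : Int) 1 ++ [(k : Int)] := by
        have := PySem.List.pyRange_one_succ_right (a := 1) (b := (k : Int)) (by exact_mod_cast hk)
        rw [← this]
        norm_num
      rw [hrange, List.foldl_append, ih hk hk2]
      simp only [List.foldl_cons, List.foldl_nil]
      have htoNat : ((k : Int)).toNat = k := Int.toNat_natCast k
      rw [htoNat]
      -- the element written at index k
      set l := nums.take k with hl
      have hllen : l.length = k := by
        rw [hl, List.length_take]; omega
      have hlne : l ≠ [] := by
        intro hc; rw [hc] at hllen; simp at hllen; omega
      have hdplen : (pvDpSpec l target false).length = k := by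
        rw [pvDpSpec_length, hllen]
      -- getD at k-1 reads the last dp entry
      have hget : (pvDpSpec l target false ++ List.replicate (nums.length - k) false).getD (k - 1) false
          = (pvDpSpec l target false).getLastD false := by
        rw [List.getD_append _ _ _ _ (by omega)]
        rw [← pvDpSpec_getD_last l target hlne, hllen]
      -- set at index k writes into head of the replicate tail
      have hset : ∀ b : Bool,
          (pvDpSpec l target false ++ List.replicate (nums.length - k) false).set k b
          = pvDpSpec l target false ++ b :: List.replicate (nums.length - (k + 1)) false := by
        intro b
        rw [List.set_append_right _ _ (by omega), hdplen]
        have : nums.length - k = (nums.length - (k + 1)) + 1 := by omega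
        rw [this, List.replicate_succ]
        simp
      rw [hget, hset]
      -- take (k+1) appends nums[k]
      have htake : nums.take (k + 1) = l ++ [nums[k]'(by omega)] := by
        rw [hl, List.take_add_one]
        congr 1
        rw [List.getElem?_eq_getElem (by omega)]
        rfl
      have hgetD : nums.getD k 0 = nums[k]'(by omega) := by
        rw [List.getD_eq_getElem?_getD, List.getElem?_eq_getElem (by omega)]
        rfl
      rw [htake, pvDpSpec_append_single, hgetD]
      simp

-- scanning pvDpSpec finds nothing when every element is ≤ target
theorem pvFindTrue_dpSpec_none (xs : List Int) (target : Int) (p : Bool) (j : Int)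
    (h : ∀ x ∈ xs, x ≤ target) :
    pvFindTrue (pvDpSpec xs target p) j = none := by
  induction xs generalizing p j with
  | nil => rfl
  | cons x rest ih =>
    have hx : x ≤ target := h x (by simp)
    simp only [pvDpSpec, pvFindTrue]
    rw [if_neg (by simp; omega)]
    exact ih _ _ (fun y hy => h y (List.mem_cons_of_mem _ hy))

-- scanning pvDpSpec finds the first exceeding index, = pvScan
theorem pvFindTrue_dpSpec_some (xs : List Int) (target : Int) (j : Int)
    (h : ∃ x ∈ xs, target < x) :
    pvFindTrue (pvDpSpec xs target false) j = some (pvScan xs target j) := by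
  induction xs generalizing j with
  | nil => simp at h
  | cons x rest ih =>
    by_cases hx : x > target
    · simp only [pvDpSpec, pvFindTrue, pvScan]
      rw [if_pos (by simp; omega), if_pos hx]
    · have hb : (!false && decide (x > target)) = false := by simp [hx]
      simp only [pvDpSpec, pvFindTrue, pvScan, hb]
      rw [if_neg (by simp), if_neg hx]
      apply ih
      rcases h with ⟨y, hy, hyt⟩
      rcases List.mem_cons.mp hy with rfl | hy'
      · omega
      · exact ⟨y, hy', hyt⟩

-- A's full dp result equals pvDpSpec on all of nums (nonempty case)
theorem pvA_eq_findTrue (nums : List Int) (target : Int) (h : nums ≠ []) :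
    get_first_nums_smaller_than_target nums target
      = pvFindTrue (pvDpSpec nums target false) 0 := by
  have hlen : 1 ≤ nums.length := List.length_pos_iff.mpr h
  unfold get_first_nums_smaller_than_target
  rw [if_neg (by simp [List.length_eq_zero_iff]; exact h)]
  have := pvFold_eq_dpSpec nums target nums.length hlen le_rfl
  simp only at this ⊢
  rw [this, List.take_length, Nat.sub_self]
  simp [List.replicate]

-- ===== VERDICT (by name: the statement is the Claim_ definition above) =====
theorem get_first_nums_smaller_than_target_spec : Claim_unchanged_get_first_nums_smaller_than_target := by
  intro nums target _ hnd
  show get_first_nums_smaller_than_target nums target = get_first_nums_smaller_than_target_alt nums target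
  rcases eq_or_ne nums ([] : List Int) with rfl | hne
  · rfl
  · have hex : ∃ x ∈ nums, target < x := by
      by_contra hna
      push Not at hna
      exact hnd ⟨hne, fun x hx => hna x hx⟩
    rw [pvA_eq_findTrue nums target hne, pvFindTrue_dpSpec_some nums target 0 hex]
    rfl

theorem get_first_nums_smaller_than_target_changed : Claim_changed_get_first_nums_smaller_than_target := by
  unfold Claim_changed_get_first_nums_smaller_than_target; decide

theorem get_first_nums_smaller_than_target_tight : Claim_exact_get_first_nums_smaller_than_target := by
  intro nums target _ hd
  rcases hd with ⟨hne, hall⟩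
  rw [pvA_eq_findTrue nums target hne, pvFindTrue_dpSpec_none nums target false 0 hall]
  simp [get_first_nums_smaller_than_target_alt]
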